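-- pv_equiv track=rewrite | github.com/juandavidjd/extracii | SRM_Taxonomy_Expander_v2.py | rules_by_keyword
-- ===== SOURCE A (Python) =====
-- def rules_by_keyword(main_kw):
--     rules = []
--
--     if any(term in main_kw for term in ["sensor", "switch"]):
--         rules.append("requiere_version_electrica")
--
--     if any(term in main_kw for term in ["rodamiento", "cojinete"]):
--         rules.append("requiere_medidas_externas")
--
--     if any(term in main_kw for term in ["cadena"]):
--         rules.append("requiere_paso_cadena")
--
--     if any(term in main_kw for term in ["carburador"]):
--         rules.append("requiere_diametro_venturi")
--
--     if len(main_kw) <= 3: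
--         rules.append("keyword_demasiado_corto")
--
--     return rules
-- ===== SOURCE B (Python) =====
-- # B: text-driven multi-pattern scan — walk the keyword once, collect the set of
-- # trigger terms that start at each position, then map matched terms to rules.
-- RULES = [
--     ("requiere_version_electrica", ("sensor", "switch")),
--     ("requiere_medidas_externas", ("rodamiento", "cojinete")),
--     ("requiere_paso_cadena", ("cadena",)),
--     ("requiere_diametro_venturi", ("carburador",)),
-- ]
-- TERMS = ("sensor", "switch", "rodamiento", "cojinete", "cadena", "carburador")
--
-- def rules_by_keyword(main_kw):
--     found = set()
--     for i in range(len(main_kw)):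
--         tail = main_kw[i:]
--         for term in TERMS:
--             if tail.startswith(term):
--                 found.add(term)
--     rules = [name for name, terms in RULES if any(t in found for t in terms)]
--     if len(main_kw) <= 3:
--         rules.append("keyword_demasiado_corto")
--     return rules
-- ===== Notes on version B (the rewrite author's own statement) =====
-- stated objective: alternative
-- what changed: Replaces A's per-rule substring tests with a single text-driven scan: walk the keyword position by position collecting the set of trigger terms that start there (naive multi-pattern matching), then emit the rules whose term set intersects the found set; the short-keyword check stays last.
import Mathlib
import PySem

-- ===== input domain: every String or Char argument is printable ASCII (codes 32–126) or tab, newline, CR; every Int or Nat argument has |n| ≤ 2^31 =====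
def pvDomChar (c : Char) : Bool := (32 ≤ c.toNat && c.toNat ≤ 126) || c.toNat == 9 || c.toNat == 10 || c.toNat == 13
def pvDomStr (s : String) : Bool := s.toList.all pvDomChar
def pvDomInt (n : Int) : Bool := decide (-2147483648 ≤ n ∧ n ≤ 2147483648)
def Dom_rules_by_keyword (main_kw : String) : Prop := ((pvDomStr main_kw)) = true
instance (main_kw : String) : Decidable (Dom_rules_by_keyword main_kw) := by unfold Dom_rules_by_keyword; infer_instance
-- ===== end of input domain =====

-- B replaces A's per-rule substring tests with a single position-by-position scan of the
-- keyword that collects the set of trigger terms found, then maps terms to rules (alternative; same cost).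


-- ===== PORT A =====
def rules_by_keyword (main_kw : String) : List String :=
  let rules := []
  let rules := if ["sensor", "switch"].any (fun term => PySem.Str.isIn term main_kw) then
      rules ++ ["requiere_version_electrica"] else rules
  let rules := if ["rodamiento", "cojinete"].any (fun term => PySem.Str.isIn term main_kw) then
      rules ++ ["requiere_medidas_externas"] else rules
  let rules := if ["cadena"].any (fun term => PySem.Str.isIn term main_kw) then
      rules ++ ["requiere_paso_cadena"] else rules
  let rules := if ["carburador"].any (fun term => PySem.Str.isIn term main_kw) then
      rules ++ ["requiere_diametro_venturi"] else rules
  let rules := if PySem.Str.len main_kw ≤ 3 then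
      rules ++ ["keyword_demasiado_corto"] else rules
  rules

-- ===== PORT B =====
-- B's rule table: rule name paired with its trigger terms (terms kept as char lists,
-- string facts are proved on the List Char side per the PySem convention).
def pvRULES : List (String × List (List Char)) :=
  [("requiere_version_electrica", ["sensor".toList, "switch".toList]),
   ("requiere_medidas_externas", ["rodamiento".toList, "cojinete".toList]),
   ("requiere_paso_cadena", ["cadena".toList]),
   ("requiere_diametro_venturi", ["carburador".toList])]

def pvTERMS : List (List Char) :=
  ["sensor".toList, "switch".toList, "rodamiento".toList, "cojinete".toList,
   "cadena".toList, "carburador".toList]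

-- the scan: for i in range(len(kw)): for term in TERMS: if kw[i:].startswith(term): found.add(term)
-- (kw[i:] for 0 ≤ i is exactly cs.drop i on the char list; startswith is PySem.Chars.startswith)
def pvScan (cs : List Char) : PySem.Set (List Char) :=
  (List.range cs.length).foldl
    (fun found i =>
      pvTERMS.foldl
        (fun f t => if PySem.Chars.startswith (cs.drop i) t then PySem.Set.add f t else f)
        found)
    PySem.Set.empty

def rules_by_keyword_alt (main_kw : String) : List String :=
  let found := pvScan main_kw.toList
  let rules := (pvRULES.filter (fun r => r.2.any (fun t => PySem.Set.contains found t))).map (fun r => r.1)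
  if PySem.Str.len main_kw ≤ 3 then rules ++ ["keyword_demasiado_corto"] else rules

-- ===== PRECONDITION & SPEC =====
def Spec_rules_by_keyword (main_kw : String) (out : List String) : Prop := out = rules_by_keyword_alt main_kw
instance (main_kw : String) (out : List String) : Decidable (Spec_rules_by_keyword main_kw out) := by unfold Spec_rules_by_keyword; infer_instance

-- ===== CLAIM (what is proved, stated in full; the proofs are below) =====
def Claim_equal_rules_by_keyword : Prop := ∀ (main_kw : String), Dom_rules_by_keyword main_kw → Spec_rules_by_keyword main_kw (rules_by_keyword main_kw)

-- ===== LEMMAS AND PROOFS =====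

-- membership in the inner fold over the term list
lemma mem_termFold (ts : List (List Char)) (cond : List Char → Bool) (f : PySem.Set (List Char)) (t : List Char) :
    t ∈ ts.foldl (fun f t' => if cond t' then PySem.Set.add f t' else f) f ↔
      t ∈ f ∨ (t ∈ ts ∧ cond t = true) := by
  induction ts generalizing f with
  | nil => simp
  | cons u us ih =>
    simp only [List.foldl_cons, ih, List.mem_cons]
    by_cases h : cond u = true
    · simp [h, PySem.Set.mem_add]
      constructor
      · rintro ((h1 | rfl) | h2)
        · exact Or.inl h1
        · exact Or.inr ⟨Or.inl rfl, h⟩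
        · exact Or.inr ⟨Or.inr h2.1, h2.2⟩
      · rintro (h1 | ⟨(rfl | hm), hc⟩)
        · exact Or.inl (Or.inl h1)
        · exact Or.inl (Or.inr rfl)
        · exact Or.inr ⟨hm, hc⟩
    · simp only [h]
      constructor
      · rintro (h1 | h2)
        · exact Or.inl h1
        · exact Or.inr ⟨Or.inr h2.1, h2.2⟩
      · rintro (h1 | ⟨(rfl | hm), hc⟩)
        · exact Or.inl h1
        · exact absurd hc h
        · exact Or.inr ⟨hm, hc⟩

-- membership in the outer fold over positions
lemma mem_posFold (cs : List Char) (l : List Nat) (f : PySem.Set (List Char)) (t : List Char) :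
    t ∈ l.foldl
        (fun found i =>
          pvTERMS.foldl
            (fun f t' => if PySem.Chars.startswith (cs.drop i) t' then PySem.Set.add f t' else f)
            found) f ↔
      t ∈ f ∨ (t ∈ pvTERMS ∧ ∃ i ∈ l, PySem.Chars.startswith (cs.drop i) t = true) := by
  induction l generalizing f with
  | nil => simp
  | cons j js ih =>
    simp only [List.foldl_cons, ih, mem_termFold, List.mem_cons]
    constructor
    · rintro ((h1 | ⟨hm, hc⟩) | ⟨hm, i, hi, hc⟩)
      · exact Or.inl h1
      · exact Or.inr ⟨hm, j, Or.inl rfl, hc⟩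
      · exact Or.inr ⟨hm, i, Or.inr hi, hc⟩
    · rintro (h1 | ⟨hm, i, (rfl | hi), hc⟩)
      · exact Or.inl (Or.inl h1)
      · exact Or.inl (Or.inr ⟨hm, hc⟩)
      · exact Or.inr ⟨hm, i, hi, hc⟩

-- a term is in the scanned set iff it is a trigger term occurring as a substring
lemma mem_pvScan (cs : List Char) (t : List Char) (ht : t ≠ []) :
    t ∈ pvScan cs ↔ t ∈ pvTERMS ∧ PySem.Chars.isIn t cs = true := by
  unfold pvScan
  rw [mem_posFold]
  simp only [PySem.Set.empty, List.not_mem_nil, false_or, List.mem_range]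
  constructor
  · rintro ⟨hm, i, hi, hc⟩
    refine ⟨hm, ?_⟩
    rw [← PySem.Chars.exists_prefix_drop_iff_isIn]
    exact ⟨i, (PySem.Chars.startswith_iff _ _).mp hc⟩
  · rintro ⟨hm, hin⟩
    refine ⟨hm, ?_⟩
    obtain ⟨j, hj⟩ := (PySem.Chars.exists_prefix_drop_iff_isIn (sub := t) (s := cs)).mpr hin
    have hjlt : j < cs.length := by
      by_contra hge
      rw [not_lt] at hge
      rw [List.drop_eq_nil_of_le hge] at hj
      exact ht (List.prefix_nil.mp hj)
    exact ⟨j, hjlt, (PySem.Chars.startswith_iff _ _).mpr hj⟩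

-- ===== VERDICT (by name: the statement is the Claim_ definition above) =====
set_option maxHeartbeats 1000000 in
theorem rules_by_keyword_spec : Claim_equal_rules_by_keyword := by
  intro main_kw _
  unfold Spec_rules_by_keyword rules_by_keyword rules_by_keyword_alt
  have hmem : ∀ t : List Char, t ≠ [] →
      (PySem.Set.contains (pvScan main_kw.toList) t = (t ∈ pvTERMS ∧ PySem.Chars.isIn t main_kw.toList = true : Bool)) := by
    intro t ht
    by_cases h : t ∈ pvScan main_kw.toList
    · have h2 := (mem_pvScan main_kw.toList t ht).mp h
      have h1 : PySem.Set.contains (pvScan main_kw.toList) t = true :=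
        (PySem.Set.contains_iff _ _).mpr h
      rw [h1]; simp [h2.1, h2.2]
    · have h2 : ¬ (t ∈ pvTERMS ∧ PySem.Chars.isIn t main_kw.toList = true) :=
        fun hc => h ((mem_pvScan main_kw.toList t ht).mpr hc)
      have h1 : PySem.Set.contains (pvScan main_kw.toList) t = false := by
        rw [← Bool.not_eq_true]
        intro hx
        exact h ((PySem.Set.contains_iff _ _).mp hx)
      rw [h1]; simp [h2]
  unfold pvRULES
  simp only [List.filter_cons, List.filter_nil, List.any_cons, List.any_nil]
  rw [hmem "sensor".toList (by decide), hmem "switch".toList (by decide),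
      hmem "rodamiento".toList (by decide), hmem "cojinete".toList (by decide),
      hmem "cadena".toList (by decide), hmem "carburador".toList (by decide)]
  simp only [PySem.Str.isIn_eq]
  simp only [show ("sensor".toList ∈ pvTERMS) = True by simp [pvTERMS],
             show ("switch".toList ∈ pvTERMS) = True by simp [pvTERMS],
             show ("rodamiento".toList ∈ pvTERMS) = True by simp [pvTERMS],
             show ("cojinete".toList ∈ pvTERMS) = True by simp [pvTERMS],
             show ("cadena".toList ∈ pvTERMS) = True by simp [pvTERMS],
             show ("carburador".toList ∈ pvTERMS) = True by simp [pvTERMS]]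
  simp only [true_and, Bool.or_false]
  split_ifs <;> simp_all
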